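-- pv_equiv track=rewrite | github.com/yaejinpark/python-lc | codewars/python_mhardy/6kyu_FizzBuzz_reversed_mhardy.py | reverse_fizz_buzz
-- ===== SOURCE A (Python) =====
-- def reverse_fizz_buzz(array):
--     res = [0,0]
--     for i in array:
--         num = array.index(i)+1
--         if i == "Fizz" and res[0] == 0:
--             res[0] += num
--         elif i == "Buzz" and res[1] == 0:
--             res[1] += num
--         elif i == "FizzBuzz":
--             if res == [0,0]:
--                 res = [num,num]
--             elif res[0] == 0:
--                 res[0] += num
--             elif res[1] == 0:
--                 res[1] += num
--     return tuple(res)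
-- ===== SOURCE B (Python) =====
-- def reverse_fizz_buzz(array):
--     # Closed form: res0 = 1 + earliest of first Fizz / first FizzBuzz; res1 likewise with Buzz.
--     f = array.index("Fizz") if "Fizz" in array else None
--     b = array.index("Buzz") if "Buzz" in array else None
--     fb = array.index("FizzBuzz") if "FizzBuzz" in array else None
--     c0 = [x for x in (f, fb) if x is not None]
--     c1 = [x for x in (b, fb) if x is not None]
--     return (min(c0) + 1 if c0 else 0, min(c1) + 1 if c1 else 0)
-- ===== Notes on version B (the rewrite author's own statement) =====
-- stated objective: faster
-- what changed: Replaces A's stateful per-element scan (which calls array.index for every element, O(n^2)) with a closed form: each result slot is 1 + the earlier of two first-occurrence indices (token itself vs 'FizzBuzz'), 0 if neither occurs.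
import Mathlib
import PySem

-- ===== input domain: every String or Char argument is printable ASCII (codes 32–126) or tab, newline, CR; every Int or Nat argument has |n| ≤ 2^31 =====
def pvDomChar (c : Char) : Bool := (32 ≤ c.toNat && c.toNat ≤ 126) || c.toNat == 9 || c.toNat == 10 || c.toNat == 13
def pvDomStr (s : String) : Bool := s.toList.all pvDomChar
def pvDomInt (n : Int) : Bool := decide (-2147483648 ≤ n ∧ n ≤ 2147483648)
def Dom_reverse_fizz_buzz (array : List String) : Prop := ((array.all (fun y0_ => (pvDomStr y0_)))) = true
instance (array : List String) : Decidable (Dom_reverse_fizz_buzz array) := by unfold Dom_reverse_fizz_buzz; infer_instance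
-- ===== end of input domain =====

-- B replaces A's stateful O(n^2) scan (list.index per element) by a direct closed form from
-- the first indices of the three tokens; objective: faster.

-- ===== PORT A =====
-- loop body of A, one step of the for-loop over the same (res0, res1) state
def pvStepA (array : List String) (res : Int × Int) (i : String) : Int × Int :=
  let num : Int := ((PySem.List.index? array i).getD 0 : Int) + 1
  if i = "Fizz" ∧ res.1 = 0 then (res.1 + num, res.2)
  else if i = "Buzz" ∧ res.2 = 0 then (res.1, res.2 + num)
  else if i = "FizzBuzz" then
    if res = (0, 0) then (num, num)
    else if res.1 = 0 then (res.1 + num, res.2)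
    else if res.2 = 0 then (res.1, res.2 + num)
    else res
  else res

def reverse_fizz_buzz (array : List String) : List Int :=
  let res := array.foldl (pvStepA array) ((0 : Int), (0 : Int))
  [res.1, res.2]

-- ===== PORT B =====
def reverse_fizz_buzz_alt (array : List String) : List Int :=
  let f := if "Fizz" ∈ array then PySem.List.index? array "Fizz" else none
  let b := if "Buzz" ∈ array then PySem.List.index? array "Buzz" else none
  let fb := if "FizzBuzz" ∈ array then PySem.List.index? array "FizzBuzz" else none
  let c0 := [f, fb].filterMap id
  let c1 := [b, fb].filterMap id
  [ (match c0.min? with | some m => (m : Int) + 1 | none => 0),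
    (match c1.min? with | some m => (m : Int) + 1 | none => 0) ]

-- ===== PRECONDITION & SPEC =====
def Spec_reverse_fizz_buzz (array : List String) (out : List Int) : Prop := out = reverse_fizz_buzz_alt array
instance (array : List String) (out : List Int) : Decidable (Spec_reverse_fizz_buzz array out) := by unfold Spec_reverse_fizz_buzz; infer_instance

-- ===== CLAIM (what is proved, stated in full; the proofs are below) =====
def Claim_equal_reverse_fizz_buzz : Prop := ∀ (array : List String), Dom_reverse_fizz_buzz array → Spec_reverse_fizz_buzz array (reverse_fizz_buzz array)

-- ===== LEMMAS AND PROOFS =====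

-- min of two optional indices (none = token absent = +infinity)
def omin : Option Nat → Option Nat → Option Nat
  | none, o => o
  | some a, none => some a
  | some a, some b => some (min a b)

-- A's res slot after processing a prefix p of array
def rho (array : List String) (tok : String) (p : List String) : Int :=
  if tok ∈ p ∨ "FizzBuzz" ∈ p then
    ((omin (PySem.List.index? array tok) (PySem.List.index? array "FizzBuzz")).getD 0 : Int) + 1
  else 0

lemma index?_append_of_not_mem {tok : String} {l t : List String} (h : tok ∉ l) :
    PySem.List.index? (l ++ t) tok = (PySem.List.index? t tok).map (· + l.length) := by
  induction l with
  | nil =>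
    rw [List.nil_append]
    cases h : PySem.List.index? t tok <;> simp [h]
  | cons x l ih =>
    have hx : x ≠ tok := fun e => h (e ▸ List.mem_cons_self)
    have hl : tok ∉ l := fun e => h (List.mem_cons_of_mem _ e)
    rw [List.cons_append, PySem.List.index?_cons_of_ne _ hx, ih hl]
    cases PySem.List.index? t tok
    · rfl
    · simp; omega

lemma index?_mid {tok i : String} {p rest : List String} (h : tok ∉ p) (hne : tok ≠ i) :
    PySem.List.index? (p ++ i :: rest) tok = (PySem.List.index? rest tok).map (· + (p.length + 1)) := by
  rw [index?_append_of_not_mem h, PySem.List.index?_cons_of_ne _ (fun e => hne e.symm)]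
  cases PySem.List.index? rest tok
  · rfl
  · simp; omega

lemma index?_self_mid {tok : String} {p rest : List String} (h : tok ∉ p) :
    PySem.List.index? (p ++ tok :: rest) tok = some p.length := by
  rw [index?_append_of_not_mem h, PySem.List.index?_cons_self]
  simp

-- next element is the first occurrence of tok: the slot value becomes p.length + 1
lemma rho_snoc_self {array : List String} {tok : String} {p rest : List String}
    (harr : array = p ++ tok :: rest) (htok : tok = "Fizz" ∨ tok = "Buzz")
    (hnp : tok ∉ p) (hfb : "FizzBuzz" ∉ p) :
    rho array tok (p ++ [tok]) = (p.length : Int) + 1 := by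
  have hne : "FizzBuzz" ≠ tok := by rcases htok with h | h <;> (subst h; decide)
  have h1 : PySem.List.index? array tok = some p.length := harr ▸ index?_self_mid hnp
  have h2 : PySem.List.index? array "FizzBuzz"
      = (PySem.List.index? rest "FizzBuzz").map (· + (p.length + 1)) := harr ▸ index?_mid hfb hne
  unfold rho
  rw [if_pos (Or.inl (by simp)), h1, h2]
  cases PySem.List.index? rest "FizzBuzz"
  · simp [omin]
  · simp [omin]; omega

-- next element is the first occurrence of FizzBuzz; tok still absent: slot becomes p.length + 1
lemma rho_snoc_fb {array : List String} {tok : String} {p rest : List String}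
    (harr : array = p ++ "FizzBuzz" :: rest) (htok : tok = "Fizz" ∨ tok = "Buzz")
    (hnp : tok ∉ p) (hfb : "FizzBuzz" ∉ p) :
    rho array tok (p ++ ["FizzBuzz"]) = (p.length : Int) + 1 := by
  have hne : tok ≠ "FizzBuzz" := by rcases htok with h | h <;> (subst h; decide)
  have h1 : PySem.List.index? array "FizzBuzz" = some p.length := harr ▸ index?_self_mid hfb
  have h2 : PySem.List.index? array tok
      = (PySem.List.index? rest tok).map (· + (p.length + 1)) := harr ▸ index?_mid hnp hne
  unfold rho
  rw [if_pos (Or.inr (by simp)), h1, h2]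
  cases PySem.List.index? rest tok
  · simp [omin]
  · simp [omin]; omega

-- appending an element that changes nothing for this slot
lemma rho_snoc_stale {array : List String} {tok i : String} {p : List String}
    (hcond : (tok ∈ p ∨ "FizzBuzz" ∈ p) ∨ (tok ≠ i ∧ "FizzBuzz" ≠ i)) :
    rho array tok (p ++ [i]) = rho array tok p := by
  unfold rho
  by_cases h : tok ∈ p ∨ "FizzBuzz" ∈ p
  · rw [if_pos h, if_pos (by rcases h with h | h; exact Or.inl (by simp [h]); exact Or.inr (by simp [h]))]
  · rw [if_neg h, if_neg]
    rcases hcond with h' | ⟨h1, h2⟩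
    · exact absurd h' h
    · push_neg at h ⊢
      simp only [List.mem_append, List.mem_singleton]
      constructor
      · rintro (hm | e)
        · exact h.1 hm
        · exact h1 e
      · rintro (hm | e)
        · exact h.2 hm
        · exact h2 e

lemma rho_pos {array : List String} {tok : String} {p : List String}
    (h : tok ∈ p ∨ "FizzBuzz" ∈ p) : rho array tok p ≠ 0 := by
  unfold rho
  rw [if_pos h]
  have : (0 : Int) ≤ ((omin (PySem.List.index? array tok) (PySem.List.index? array "FizzBuzz")).getD 0 : Int) := Int.natCast_nonneg _
  omega

lemma rho_zero {array : List String} {tok : String} {p : List String}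
    (h : tok ∉ p ∧ "FizzBuzz" ∉ p) : rho array tok p = 0 := by
  unfold rho
  rw [if_neg (by rintro (h' | h'); exact h.1 h'; exact h.2 h')]

lemma stepA_eq {array : List String} {i : String} {p rest : List String}
    (harr : array = p ++ i :: rest) :
    pvStepA array (rho array "Fizz" p, rho array "Buzz" p) i
      = (rho array "Fizz" (p ++ [i]), rho array "Buzz" (p ++ [i])) := by
  by_cases hF : i = "Fizz"
  · subst hF
    by_cases hc : "Fizz" ∈ p ∨ "FizzBuzz" ∈ p
    · have h0 := rho_pos (array := array) hc
      rw [rho_snoc_stale (Or.inl hc),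
          rho_snoc_stale (tok := "Buzz") (i := "Fizz") (Or.inr ⟨by decide, by decide⟩)]
      unfold pvStepA
      split_ifs with g1 g2 g3 <;> first | rfl | (exfalso; simp_all)
    · push_neg at hc
      have h0 := rho_zero (array := array) (tok := "Fizz") hc
      have hnum : PySem.List.index? array "Fizz" = some p.length := harr ▸ index?_self_mid hc.1
      rw [rho_snoc_self harr (Or.inl rfl) hc.1 hc.2,
          rho_snoc_stale (tok := "Buzz") (i := "Fizz") (Or.inr ⟨by decide, by decide⟩)]
      unfold pvStepA
      rw [if_pos ⟨rfl, h0⟩, hnum, h0]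
      simp
  · by_cases hB : i = "Buzz"
    · subst hB
      by_cases hc : "Buzz" ∈ p ∨ "FizzBuzz" ∈ p
      · have h0 := rho_pos (array := array) hc
        rw [rho_snoc_stale (tok := "Fizz") (i := "Buzz") (Or.inr ⟨by decide, by decide⟩),
            rho_snoc_stale (Or.inl hc)]
        unfold pvStepA
        split_ifs with g1 g2 g3 <;> first | rfl | (exfalso; simp_all)
      · push_neg at hc
        have h0 := rho_zero (array := array) (tok := "Buzz") hc
        have hnum : PySem.List.index? array "Buzz" = some p.length := harr ▸ index?_self_mid hc.1
        rw [rho_snoc_stale (tok := "Fizz") (i := "Buzz") (Or.inr ⟨by decide, by decide⟩),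
            rho_snoc_self harr (Or.inr rfl) hc.1 hc.2]
        unfold pvStepA
        rw [if_neg (by rintro ⟨e, -⟩; exact absurd e (by decide)), if_pos ⟨rfl, h0⟩, hnum, h0]
        simp
    · by_cases hFB : i = "FizzBuzz"
      · subst hFB
        by_cases hfb : "FizzBuzz" ∈ p
        · have h0 := rho_pos (array := array) (tok := "Fizz") (Or.inr hfb)
          have h1 := rho_pos (array := array) (tok := "Buzz") (Or.inr hfb)
          rw [rho_snoc_stale (Or.inl (Or.inr hfb)), rho_snoc_stale (Or.inl (Or.inr hfb))]
          unfold pvStepA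
          split_ifs with g1 g2 g3 g4 g5 g6 <;>
            first | rfl | (exfalso; simp_all [Prod.ext_iff])
        · have hnum : PySem.List.index? array "FizzBuzz" = some p.length :=
            harr ▸ index?_self_mid hfb
          by_cases hf : "Fizz" ∈ p
          · have h0 := rho_pos (array := array) (tok := "Fizz") (Or.inl hf)
            by_cases hb : "Buzz" ∈ p
            · have h1 := rho_pos (array := array) (tok := "Buzz") (Or.inl hb)
              rw [rho_snoc_stale (Or.inl (Or.inl hf)), rho_snoc_stale (Or.inl (Or.inl hb))]
              unfold pvStepA
              split_ifs with g1 g2 g3 g4 g5 g6 <;>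
                first | rfl | (exfalso; simp_all [Prod.ext_iff])
            · have h1 := rho_zero (array := array) (tok := "Buzz") ⟨hb, hfb⟩
              rw [rho_snoc_stale (Or.inl (Or.inl hf)), rho_snoc_fb harr (Or.inr rfl) hb hfb]
              unfold pvStepA
              rw [if_neg (by rintro ⟨e, -⟩; exact absurd e (by decide)),
                  if_neg (by rintro ⟨e, -⟩; exact absurd e (by decide)),
                  if_pos rfl, if_neg (by simp [Prod.ext_iff, h0]), if_neg h0, if_pos h1,
                  hnum, h1]
              simp
          · have h0 := rho_zero (array := array) (tok := "Fizz") ⟨hf, hfb⟩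
            by_cases hb : "Buzz" ∈ p
            · have h1 := rho_pos (array := array) (tok := "Buzz") (Or.inl hb)
              rw [rho_snoc_fb harr (Or.inl rfl) hf hfb, rho_snoc_stale (Or.inl (Or.inl hb))]
              unfold pvStepA
              rw [if_neg (by rintro ⟨e, -⟩; exact absurd e (by decide)),
                  if_neg (by rintro ⟨e, -⟩; exact absurd e (by decide)),
                  if_pos rfl, if_neg (by simp [Prod.ext_iff, h1]), if_pos h0, hnum, h0]
              simp
            · have h0' := rho_zero (array := array) (tok := "Fizz") ⟨hf, hfb⟩
              have h1 := rho_zero (array := array) (tok := "Buzz") ⟨hb, hfb⟩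
              rw [rho_snoc_fb harr (Or.inl rfl) hf hfb, rho_snoc_fb harr (Or.inr rfl) hb hfb]
              unfold pvStepA
              rw [if_neg (by rintro ⟨e, -⟩; exact absurd e (by decide)),
                  if_neg (by rintro ⟨e, -⟩; exact absurd e (by decide)),
                  if_pos rfl, if_pos (by simp [Prod.ext_iff, h0', h1]), hnum]
              simp
      · rw [rho_snoc_stale (tok := "Fizz")
              (Or.inr ⟨fun e => hF e.symm, fun e => hFB e.symm⟩),
            rho_snoc_stale (tok := "Buzz")
              (Or.inr ⟨fun e => hB e.symm, fun e => hFB e.symm⟩)]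
        unfold pvStepA
        rw [if_neg (by rintro ⟨e, -⟩; exact hF e),
            if_neg (by rintro ⟨e, -⟩; exact hB e),
            if_neg hFB]

lemma fold_inv (array : List String) : ∀ (rest p : List String), array = p ++ rest →
    rest.foldl (pvStepA array) (rho array "Fizz" p, rho array "Buzz" p)
      = (rho array "Fizz" array, rho array "Buzz" array) := by
  intro rest
  induction rest with
  | nil => intro p harr; simp at harr; simp [harr]
  | cons i rest ih =>
    intro p harr
    rw [List.foldl_cons, stepA_eq harr]
    exact ih (p ++ [i]) (by simpa using harr)

lemma rho_eq_alt_slot (array : List String) (tok : String) :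
    rho array tok array
      = (match ([if tok ∈ array then PySem.List.index? array tok else none,
                 if "FizzBuzz" ∈ array then PySem.List.index? array "FizzBuzz" else none].filterMap id).min? with
         | some m => (m : Int) + 1 | none => 0) := by
  have e1 : (if tok ∈ array then PySem.List.index? array tok else none) = PySem.List.index? array tok := by
    split
    · rfl
    · rename_i h; exact ((PySem.List.index?_eq_none_iff _ _).mpr h).symm
  have e2 : (if "FizzBuzz" ∈ array then PySem.List.index? array "FizzBuzz" else none)
      = PySem.List.index? array "FizzBuzz" := by
    split
    · rfl
    · rename_i h; exact ((PySem.List.index?_eq_none_iff _ _).mpr h).symm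
  rw [e1, e2]
  unfold rho
  by_cases h : tok ∈ array ∨ "FizzBuzz" ∈ array
  · rw [if_pos h]
    rcases hf : PySem.List.index? array tok with _ | a <;>
      rcases hfb : PySem.List.index? array "FizzBuzz" with _ | b
    · rcases h with h | h
      · exact absurd ((PySem.List.index?_eq_none_iff _ _).mp hf) (by simp [h])
      · exact absurd ((PySem.List.index?_eq_none_iff _ _).mp hfb) (by simp [h])
    · simp [omin, List.min?]
    · simp [omin, List.min?]
    · simp [omin, List.min?]
  · push_neg at h
    rw [if_neg (by rintro (h' | h'); exact absurd h' (by simp [h.1]); exact absurd h' (by simp [h.2]))]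
    rw [(PySem.List.index?_eq_none_iff _ _).mpr h.1, (PySem.List.index?_eq_none_iff _ _).mpr h.2]
    simp [List.min?]

-- ===== VERDICT (by name: the statement is the Claim_ definition above) =====
theorem reverse_fizz_buzz_spec : Claim_equal_reverse_fizz_buzz := by
  intro array _
  unfold Spec_reverse_fizz_buzz reverse_fizz_buzz reverse_fizz_buzz_alt
  have h0 : rho array "Fizz" [] = 0 := rho_zero (by simp)
  have h1 : rho array "Buzz" [] = 0 := rho_zero (by simp)
  have hinv := fold_inv array array [] rfl
  rw [h0, h1] at hinv
  simp only [hinv]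
  rw [rho_eq_alt_slot array "Fizz", rho_eq_alt_slot array "Buzz"]
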